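-- pv_equiv track=rewrite | github.com/tsundvoll/aoc | aoc_2020/day_24/solution.py | parse_tiles_to_turn
-- ===== SOURCE A (Python) =====
-- def parse_tiles_to_turn(data):
--     tiles = []
--     for line in data:
--         idx = 0
--         i = 0
--         j = 0
--         while idx < len(line):
--             if line[idx] == 's' or line[idx] == 'n':
--                 direction = line[idx:idx+2]
--                 idx += 2
--             else:
--                 direction = line[idx]
--                 idx += 1
--
--             if direction == 'e':
--                 j += 1
--             elif direction == 'se':
--                 i += 1
--             elif direction == 'sw':
--                 i += 1
--                 j -= 1
--             elif direction == 'w':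
--                 j -= 1
--             elif direction == 'nw':
--                 i -= 1
--             elif direction == 'ne':
--                 i -= 1
--                 j += 1
--         tiles.append((i,j))
--     return tiles
-- ===== SOURCE B (Python) =====
-- # B: a character-at-a-time finite-state machine (pending prefix 's'/'n' as state),
-- # no lookahead slicing and no token list; one transition-table lookup per character.
-- _DELTA = {('', 'e'): (0, 1), ('', 'w'): (0, -1),
--           ('s', 'e'): (1, 0), ('s', 'w'): (1, -1),
--           ('n', 'e'): (-1, 1), ('n', 'w'): (-1, 0)}
--
--
-- def parse_tiles_to_turn(data):
--     tiles = []
--     for line in data: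
--         i = j = 0
--         pending = ''
--         for c in line:
--             if not pending and c in ('s', 'n'):
--                 pending = c
--             else:
--                 di, dj = _DELTA.get((pending, c), (0, 0))
--                 i += di
--                 j += dj
--                 pending = ''
--         tiles.append((i, j))
--     return tiles
-- ===== Notes on version B (the rewrite author's own statement) =====
-- stated objective: alternative
-- what changed: B replaces A's lookahead while loop (slice a 1- or 2-char token out of the line, then an if/elif chain) by a character-at-a-time finite-state machine: one fold over the characters carrying a pending-prefix state ('' / 's' / 'n') and applying a (state, char) -> (di, dj) transition table, with no slicing and no token values.
import Mathlib
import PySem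

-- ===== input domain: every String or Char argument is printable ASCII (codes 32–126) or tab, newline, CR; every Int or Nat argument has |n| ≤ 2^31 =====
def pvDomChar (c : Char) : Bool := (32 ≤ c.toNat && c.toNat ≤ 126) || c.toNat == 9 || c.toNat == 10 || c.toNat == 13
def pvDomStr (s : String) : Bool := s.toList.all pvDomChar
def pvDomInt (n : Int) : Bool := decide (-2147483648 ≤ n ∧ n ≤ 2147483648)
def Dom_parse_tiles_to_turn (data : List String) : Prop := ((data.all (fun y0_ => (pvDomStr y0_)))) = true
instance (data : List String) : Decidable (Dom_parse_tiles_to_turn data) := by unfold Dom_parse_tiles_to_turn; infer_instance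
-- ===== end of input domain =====

-- B replaces A's lookahead while loop (slice out a 1- or 2-char token, if/elif chain)
-- by a character-at-a-time finite-state machine with a pending-prefix state (objective: alternative).

-- ===== PORT A =====
-- A's if/elif chain on `direction`, updating (i, j); same tests in the same order.
def pvStepDirA (i j : Int) (direction : List Char) : Int × Int :=
  if direction = ['e'] then (i, j + 1)
  else if direction = ['s', 'e'] then (i + 1, j)
  else if direction = ['s', 'w'] then (i + 1, j - 1)
  else if direction = ['w'] then (i, j - 1)
  else if direction = ['n', 'w'] then (i - 1, j)
  else if direction = ['n', 'e'] then (i - 1, j + 1)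
  else (i, j)

-- A's while loop over idx, ported as recursion on the remaining characters:
-- line[idx] is the head of the suffix, line[idx:idx+2] its first two chars,
-- idx += 1 / idx += 2 drops 1 / 2 characters. Exact.
def pvLineA : List Char → Int → Int → Int × Int
  | [], i, j => (i, j)
  | c :: rest, i, j =>
    if c = 's' ∨ c = 'n' then
      let d := pvStepDirA i j (c :: rest.take 1)
      pvLineA (rest.drop 1) d.1 d.2
    else
      let d := pvStepDirA i j [c]
      pvLineA rest d.1 d.2
termination_by cs => cs.length
decreasing_by all_goals simp

def parse_tiles_to_turn (data : List String) : List (Int × Int) :=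
  data.foldl (fun tiles line => tiles ++ [pvLineA line.toList 0 0]) []

-- ===== PORT B =====
-- the transition table _DELTA: Python keys are (str, str) pairs, ported as (List Char × List Char)
def pvDelta : PySem.Dict (List Char × List Char) (Int × Int) :=
  PySem.Dict.ofList [(([], ['e']), (0, 1)), (([], ['w']), (0, -1)),
                     ((['s'], ['e']), (1, 0)), ((['s'], ['w']), (1, -1)),
                     ((['n'], ['e']), (-1, 1)), ((['n'], ['w']), (-1, 0))]

-- one FSM transition: state = (pending, i, j)
def pvFsmStep (st : List Char × Int × Int) (c : Char) : List Char × Int × Int :=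
  if st.1 = [] ∧ (c = 's' ∨ c = 'n') then ([c], st.2.1, st.2.2)
  else
    let d := pvDelta.getD (st.1, [c]) (0, 0)
    ([], st.2.1 + d.1, st.2.2 + d.2)

-- run the machine over one line; a trailing pending prefix is discarded
def pvFsmRun (cs : List Char) : Int × Int :=
  (cs.foldl pvFsmStep ([], 0, 0)).2

def parse_tiles_to_turn_alt (data : List String) : List (Int × Int) :=
  data.map (fun line => pvFsmRun line.toList)

-- ===== PRECONDITION & SPEC =====
def Spec_parse_tiles_to_turn (data : List String) (out : List (Int × Int)) : Prop := out = parse_tiles_to_turn_alt data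
instance (data : List String) (out : List (Int × Int)) : Decidable (Spec_parse_tiles_to_turn data out) := by unfold Spec_parse_tiles_to_turn; infer_instance

-- ===== CLAIM (what is proved, stated in full; the proofs are below) =====
def Claim_equal_parse_tiles_to_turn : Prop := ∀ (data : List String), Dom_parse_tiles_to_turn data → Spec_parse_tiles_to_turn data (parse_tiles_to_turn data)

-- ===== LEMMAS AND PROOFS =====

-- the transition-table lookup, evaluated into an if-chain over its six keys
theorem pvDelta_getD (k : List Char × List Char) :
    pvDelta.getD k (0, 0) =
      if k = ([], ['e']) then ((0 : Int), (1 : Int)) else if k = ([], ['w']) then (0, -1)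
      else if k = (['s'], ['e']) then (1, 0) else if k = (['s'], ['w']) then (1, -1)
      else if k = (['n'], ['e']) then (-1, 1) else if k = (['n'], ['w']) then (-1, 0)
      else (0, 0) := by
  have h : pvDelta.items = [(([], ['e']), (0, 1)), (([], ['w']), (0, -1)),
      ((['s'], ['e']), (1, 0)), ((['s'], ['w']), (1, -1)),
      ((['n'], ['e']), (-1, 1)), ((['n'], ['w']), (-1, 0))] := by decide
  simp only [PySem.Dict.getD, PySem.Dict.get?, h, List.find?]
  split_ifs with h1 h2 h3 h4 h5 h6
  · subst h1; rfl
  · subst h2; rfl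
  · subst h3; rfl
  · subst h4; rfl
  · subst h5; rfl
  · subst h6; rfl
  · simp only [beq_eq_false_iff_ne.mpr (Ne.symm h1), beq_eq_false_iff_ne.mpr (Ne.symm h2),
      beq_eq_false_iff_ne.mpr (Ne.symm h3), beq_eq_false_iff_ne.mpr (Ne.symm h4),
      beq_eq_false_iff_ne.mpr (Ne.symm h5), beq_eq_false_iff_ne.mpr (Ne.symm h6)]
    rfl

-- an FSM transition from the empty state on a non-'s'/'n' char = A's one-char-token step
theorem pv_step1 (c : Char) (i j : Int) (h : ¬ (c = 's' ∨ c = 'n')) :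
    pvFsmStep ([], i, j) c = ([], pvStepDirA i j [c]) := by
  simp only [pvFsmStep]
  rw [if_neg (by simp [h])]
  simp only [pvDelta_getD, pvStepDirA]
  split_ifs <;> simp_all [Prod.ext_iff] <;> omega

-- an FSM transition from a pending 's'/'n' state = A's two-char-token step
theorem pv_step2 (c c2 : Char) (i j : Int) (_h : c = 's' ∨ c = 'n') :
    pvFsmStep ([c], i, j) c2 = ([], pvStepDirA i j [c, c2]) := by
  simp only [pvFsmStep]
  rw [if_neg (by simp)]
  simp only [pvDelta_getD, pvStepDirA]
  split_ifs <;> simp_all [Prod.ext_iff] <;> omega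

-- A's loop over one line equals running the FSM from the empty state, from any accumulator
theorem pv_line_eq_fsm : ∀ (n : Nat) (cs : List Char), cs.length ≤ n → ∀ (i j : Int),
    (cs.foldl pvFsmStep ([], i, j)).2 = pvLineA cs i j := by
  intro n
  induction n with
  | zero =>
    intro cs hcs i j
    have hnil : cs = [] := List.eq_nil_of_length_eq_zero (Nat.le_zero.mp hcs)
    subst hnil; simp [pvLineA]
  | succ n ih =>
    intro cs hcs i j
    match cs with
    | [] => simp [pvLineA]
    | c :: rest =>
      by_cases h : c = 's' ∨ c = 'n'
      · rw [pvLineA]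
        simp only [if_pos h, List.foldl_cons]
        rw [pvFsmStep, if_pos ⟨rfl, h⟩]
        match rest with
        | [] =>
          rcases h with h | h <;> subst h <;>
            simp [pvLineA, pvStepDirA]
        | c2 :: rest' =>
          simp only [List.take, List.drop, List.foldl_cons, pv_step2 c c2 _ _ h]
          exact ih rest' (by simp at hcs ⊢; omega) _ _
      · rw [pvLineA]
        simp only [if_neg h, List.foldl_cons, pv_step1 c _ _ h]
        exact ih rest (by simp at hcs; omega) _ _

theorem pv_foldl_append_eq_map (data : List String) : ∀ acc : List (Int × Int),
    data.foldl (fun tiles line => tiles ++ [pvLineA line.toList 0 0]) acc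
      = acc ++ data.map (fun line => pvFsmRun line.toList) := by
  induction data with
  | nil => simp
  | cons x xs ihd =>
    intro acc
    rw [List.foldl_cons, ihd, List.map_cons]
    simp [pvFsmRun, pv_line_eq_fsm x.toList.length x.toList le_rfl]

-- ===== VERDICT (by name: the statement is the Claim_ definition above) =====
theorem parse_tiles_to_turn_spec : Claim_equal_parse_tiles_to_turn := by
  intro data _
  unfold Spec_parse_tiles_to_turn parse_tiles_to_turn parse_tiles_to_turn_alt
  simpa using pv_foldl_append_eq_map data []
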